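-- pv_equiv track=rewrite | github.com/alxgmpr/lutron-tools | packet_boundary_analysis.py | find_preamble
-- ===== SOURCE A (Python) =====
-- def find_preamble(bits):
--     best_pos, best_run = 0, 0
--     for pos in range(min(100, len(bits) - 16)):
--         run = 0
--         for j in range(min(64, len(bits) - pos)):
--             expected = (bits[pos] + j) % 2
--             if bits[pos + j] == expected:
--                 run += 1
--             else:
--                 break
--         if run > best_run:
--             best_run = run
--             best_pos = pos
--     return best_pos, best_run
-- ===== SOURCE B (Python) =====
-- def find_preamble(bits):
--     n = len(bits)
--     # reverse pass: runlen[i] = length of alternating 0/1 run starting at i (0 if bits[i] not a bit)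
--     runlen = [0] * n
--     for i in range(n - 1, -1, -1):
--         b = bits[i]
--         if b == 0 or b == 1:
--             if i + 1 < n and bits[i + 1] == 1 - b:
--                 runlen[i] = 1 + runlen[i + 1]
--             else:
--                 runlen[i] = 1
--     best_pos, best_run = 0, 0
--     for pos in range(min(100, n - 16)):
--         run = runlen[pos] if runlen[pos] < 64 else 64
--         if run > best_run:
--             best_pos, best_run = pos, run
--     return best_pos, best_run
-- ===== Notes on version B (the rewrite author's own statement) =====
-- stated objective: alternative
-- what changed: Replaces the nested rescan (up to 64 inner steps per candidate position) with a reverse pass building a run-length table runlen[i] = alternating-bit run starting at i, then a single forward scan taking min(runlen[pos],64).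
import Mathlib
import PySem

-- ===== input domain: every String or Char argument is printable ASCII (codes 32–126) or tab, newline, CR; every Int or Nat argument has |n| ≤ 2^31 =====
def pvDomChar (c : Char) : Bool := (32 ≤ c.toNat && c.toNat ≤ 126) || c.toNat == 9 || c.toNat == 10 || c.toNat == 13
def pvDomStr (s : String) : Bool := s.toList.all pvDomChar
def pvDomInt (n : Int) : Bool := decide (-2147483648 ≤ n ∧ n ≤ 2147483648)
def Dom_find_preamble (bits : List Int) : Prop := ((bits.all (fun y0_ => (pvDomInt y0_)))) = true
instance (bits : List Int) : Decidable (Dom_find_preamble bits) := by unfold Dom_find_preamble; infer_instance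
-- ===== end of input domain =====

-- B replaces A's nested rescan by a reverse-pass run-length table plus one forward scan (alternative algorithm, same results).

-- ===== PORT A =====
-- inner 'for j in range(...)' loop with break, run accumulator
def innerA (bits : List Int) (pos : Int) : List Int → Int → Int
  | [], run => run
  | j :: js, run =>
    let expected := PySem.Int.mod (PySem.List.pyGetD bits pos 0 + j) 2
    if PySem.List.pyGetD bits (pos + j) 0 = expected then
      innerA bits pos js (run + 1)
    else run

def find_preamble (bits : List Int) : Int × Int :=
  (PySem.List.pyRange 0 (min 100 ((bits.length : Int) - 16)) 1).foldl
    (fun st pos =>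
      let run := innerA bits pos (PySem.List.pyRange 0 (min 64 ((bits.length : Int) - pos)) 1) 0
      if run > st.2 then (pos, run) else st)
    (0, 0)

-- ===== PORT B =====
-- reverse pass of Source B: runlen[i] = 0 if bits[i] ∉ {0,1}, else 1 (+ runlen[i+1] if the next bit alternates)
def buildRunlen : List Int → List Int
  | [] => []
  | b :: rest =>
    let r := buildRunlen rest
    let v : Int :=
      if b = 0 ∨ b = 1 then
        if rest ≠ [] ∧ rest.headD 0 = 1 - b then 1 + r.headD 0 else 1
      else 0
    v :: r

def find_preamble_alt (bits : List Int) : Int × Int :=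
  let runlen := buildRunlen bits
  (PySem.List.pyRange 0 (min 100 ((bits.length : Int) - 16)) 1).foldl
    (fun st pos =>
      let rl := PySem.List.pyGetD runlen pos 0
      let run := if rl < 64 then rl else 64
      if run > st.2 then (pos, run) else st)
    (0, 0)

-- ===== PRECONDITION & SPEC =====
def Spec_find_preamble (bits : List Int) (out : Int × Int) : Prop := out = find_preamble_alt bits
instance (bits : List Int) (out : Int × Int) : Decidable (Spec_find_preamble bits out) := by unfold Spec_find_preamble; infer_instance

-- ===== CLAIM (what is proved, stated in full; the proofs are below) =====
def Claim_equal_find_preamble : Prop := ∀ (bits : List Int), Dom_find_preamble bits → Spec_find_preamble bits (find_preamble bits)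

-- ===== LEMMAS AND PROOFS =====

-- alternating-run length starting at the head (proof-side characterisation of both programs)
def arun : List Int → Int
  | [] => 0
  | b :: rest =>
    if b = 0 ∨ b = 1 then
      if rest.headD 2 = 1 - b then 1 + arun rest else 1
    else 0

theorem arun_nonneg (s : List Int) : 0 ≤ arun s := by
  induction s with
  | nil => simp [arun]
  | cons b rest ih => simp only [arun]; split_ifs <;> omega

theorem arun_le_length (s : List Int) : arun s ≤ (s.length : Int) := by
  induction s with
  | nil => simp [arun]
  | cons b rest ih =>
    simp only [arun, List.length_cons]
    split_ifs <;> push_cast <;> omega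

theorem buildRunlen_headD (s : List Int) : (buildRunlen s).headD 0 = arun s := by
  induction s with
  | nil => simp [buildRunlen, arun]
  | cons b rest ih =>
    have e1 : buildRunlen (b :: rest)
        = (if b = 0 ∨ b = 1 then
            (if rest ≠ [] ∧ rest.headD 0 = 1 - b then 1 + (buildRunlen rest).headD 0 else 1)
          else 0) :: buildRunlen rest := rfl
    have e2 : arun (b :: rest)
        = if b = 0 ∨ b = 1 then (if rest.headD 2 = 1 - b then 1 + arun rest else 1) else 0 := rfl
    rw [e1, List.headD_cons, e2]
    by_cases hb : b = 0 ∨ b = 1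
    · rw [if_pos hb, if_pos hb]
      cases rest with
      | nil =>
        rw [if_neg (by simp), if_neg (by rcases hb with h | h <;> subst h <;> decide)]
      | cons x xs =>
        by_cases hx : x = 1 - b
        · rw [if_pos ⟨by simp, by simpa using hx⟩, if_pos (by simpa using hx), ih]
        · rw [if_neg (by simp [hx]), if_neg (by simpa using hx)]
    · rw [if_neg hb, if_neg hb]

theorem buildRunlen_drop (s : List Int) (k : Nat) :
    (buildRunlen s).drop k = buildRunlen (s.drop k) := by
  induction s generalizing k with
  | nil => simp [buildRunlen]
  | cons b rest ih =>
    cases k with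
    | zero => simp
    | succ k' => simp only [List.drop_succ_cons]; exact ih k'

theorem getD_eq_drop_headD (l : List Int) (k : Nat) (d : Int) :
    l.getD k d = (l.drop k).headD d := by
  induction l generalizing k with
  | nil => simp
  | cons x xs ih => cases k with
    | zero => simp
    | succ k' => simpa using ih k'

theorem runlen_lookup (bits : List Int) (p : Nat) :
    (buildRunlen bits).getD p 0 = arun (bits.drop p) := by
  rw [getD_eq_drop_headD, buildRunlen_drop, buildRunlen_headD]

-- SUFFIX: innerA only reads bits at pos + j, so it can be run on the suffix
theorem innerA_suffix (bits : List Int) (p : Nat) (js : List Int) (run : Int)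
    (h : ∀ j ∈ js, 0 ≤ j) :
    innerA bits (p : Int) js run = innerA (bits.drop p) 0 js run := by
  induction js generalizing run with
  | nil => rfl
  | cons j js ih =>
    have hj : 0 ≤ j := h j (by simp)
    have hbase : PySem.List.pyGetD bits (p : Int) 0 = PySem.List.pyGetD (bits.drop p) 0 0 := by
      simp [PySem.List.pyGetD_natCast, PySem.List.pyGetD_zero, List.getD_eq_getElem?_getD,
        List.getElem?_drop]
    have hidx : PySem.List.pyGetD bits ((p : Int) + j) 0
        = PySem.List.pyGetD (bits.drop p) (0 + j) 0 := by
      have hk : j = ((j.toNat : Nat) : Int) := by omega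
      rw [hk]
      have h1 : (p : Int) + ((j.toNat : Nat) : Int) = (((p + j.toNat : Nat) : Nat) : Int) := by
        push_cast
        ring
      rw [h1, zero_add, PySem.List.pyGetD_natCast, PySem.List.pyGetD_natCast,
        List.getD_eq_getElem?_getD, List.getD_eq_getElem?_getD, List.getElem?_drop]
    simp only [innerA, hbase, hidx]
    split_ifs with hc
    · exact ih (run + 1) (fun x hx => h x (by simp [hx]))
    · rfl

-- SHIFT: one alternating step peels the head off the suffix
theorem innerA_shift (b : Int) (rest : List Int) (hb : b = 0 ∨ b = 1)
    (hne : rest ≠ []) (hnb : rest.headD 0 = 1 - b) (js : List Int) (run : Int)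
    (h : ∀ j ∈ js, 1 ≤ j) :
    innerA (b :: rest) 0 js run = innerA rest 0 (js.map (· - 1)) run := by
  induction js generalizing run with
  | nil => rfl
  | cons j js ih =>
    have hj : 1 ≤ j := h j (by simp)
    obtain ⟨k, hkj⟩ : ∃ k : Nat, j = (k : Int) + 1 := ⟨(j - 1).toNat, by omega⟩
    have hhead : PySem.List.pyGetD (b :: rest) 0 0 = b := by
      simp [PySem.List.pyGetD_zero_cons]
    have hhead2 : PySem.List.pyGetD rest 0 0 = 1 - b := by
      rw [← hnb]
      cases rest with
      | nil => simp at hne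
      | cons x xs => simp [PySem.List.pyGetD_zero_cons]
    have hcons : PySem.List.pyGetD (b :: rest) (0 + j) 0
        = PySem.List.pyGetD rest (0 + (j - 1)) 0 := by
      subst hkj
      have h1 : (0 : Int) + ((k : Int) + 1) = (((k + 1 : Nat) : Nat) : Int) := by push_cast; ring
      have h2 : (0 : Int) + ((k : Int) + 1 - 1) = ((k : Nat) : Int) := by push_cast; ring
      rw [h1, h2, PySem.List.pyGetD_natCast, PySem.List.pyGetD_natCast]
      simp
    have hmod : PySem.Int.mod (b + j) 2 = PySem.Int.mod (1 - b + (j - 1)) 2 := by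
      rw [PySem.Int.mod_eq_emod_of_pos (by omega), PySem.Int.mod_eq_emod_of_pos (by omega)]
      omega
    simp only [innerA, List.map_cons, hhead, hhead2, hcons, hmod]
    split_ifs with hc
    · exact ih (run + 1) (fun x hx => h x (by simp [hx]))
    · rfl

theorem map_sub_one_pyRange (m : Int) :
    (PySem.List.pyRange 1 m 1).map (· - 1) = PySem.List.pyRange 0 (m - 1) 1 := by
  rw [PySem.List.pyRange_one, PySem.List.pyRange_one, List.map_map]
  have h : (m - 1 - 0).toNat = (m - 1).toNat := by omega
  rw [h]
  apply List.map_congr_left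
  intro k _
  simp

theorem mod_two_self (b : Int) (hb : b = 0 ∨ b = 1) : PySem.Int.mod b 2 = b := by
  rcases hb with h | h <;> subst h <;> decide

theorem mod_two_flip (b : Int) (hb : b = 0 ∨ b = 1) : PySem.Int.mod (b + 1) 2 = 1 - b := by
  rcases hb with h | h <;> subst h <;> decide

theorem mod_two_ne_self (b : Int) (hb : ¬(b = 0 ∨ b = 1)) : b ≠ PySem.Int.mod b 2 := by
  have h1 := PySem.Int.mod_nonneg b (show (0:Int) < 2 by omega)
  have h2 := PySem.Int.mod_lt b (show (0:Int) < 2 by omega)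
  intro h
  have hb' : b = 0 ∨ b = 1 := by omega
  exact hb hb'

-- INNER: A's inner loop over range(m) computes min(arun s, m)
theorem innerA_eq_min (s : List Int) : ∀ (m : Int), 0 ≤ m → m ≤ (s.length : Int) →
    ∀ (run : Int), innerA s 0 (PySem.List.pyRange 0 m 1) run = run + min (arun s) m := by
  induction s with
  | nil =>
    intro m h0 hm run
    have hm0 : m = 0 := by simp at hm; omega
    subst hm0
    rw [PySem.List.pyRange_one_eq_nil (by omega)]
    simp [innerA, arun]
  | cons b rest ih =>
    intro m h0 hm run
    by_cases hm0 : m = 0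
    · subst hm0
      rw [PySem.List.pyRange_one_eq_nil (by omega)]
      have := arun_nonneg (b :: rest)
      simp only [innerA]
      omega
    have hm1 : 1 ≤ m := by omega
    rw [PySem.List.pyRange_one_cons (by omega)]
    simp only [zero_add]
    by_cases hb : b = 0 ∨ b = 1
    · have hstep : innerA (b :: rest) 0 (0 :: PySem.List.pyRange 1 m 1) run
          = innerA (b :: rest) 0 (PySem.List.pyRange 1 m 1) (run + 1) := by
        simp only [innerA, PySem.List.pyGetD_zero_cons, add_zero,
          mod_two_self b hb]
        simp
      rw [hstep]
      cases rest with
      | nil =>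
        have hmeq : m = 1 := by simp at hm; omega
        subst hmeq
        rw [PySem.List.pyRange_one_eq_nil (by omega)]
        have harun : arun [b] = 1 := by
          simp only [arun, List.headD_nil]
          rw [if_pos hb, if_neg (by omega)]
        simp [innerA, harun]
      | cons nb rest' =>
        by_cases hnb : nb = 1 - b
        · rw [innerA_shift b (nb :: rest') hb (by simp) (by simpa using hnb) _ _
            (fun j hj => (PySem.List.mem_pyRange_one.mp hj).1)]
          rw [map_sub_one_pyRange]
          have hlen : m - 1 ≤ ((nb :: rest').length : Int) := by
            simp at hm ⊢; omega
          rw [ih (m - 1) (by omega) hlen (run + 1)]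
          have harun : arun (b :: nb :: rest') = 1 + arun (nb :: rest') := by
            simp only [arun, List.headD_cons]
            rw [if_pos hb, if_pos hnb]
          rw [harun]
          omega
        · have harun : arun (b :: nb :: rest') = 1 := by
            simp only [arun, List.headD_cons]
            rw [if_pos hb, if_neg hnb]
          rw [harun]
          by_cases hm2 : m = 1
          · subst hm2
            rw [PySem.List.pyRange_one_eq_nil (by omega)]
            simp [innerA]
          · rw [PySem.List.pyRange_one_cons (by omega)]
            have hget : PySem.List.pyGetD (b :: nb :: rest') ((0 : Int) + 1) 0 = nb := by
              rw [zero_add, show (1 : Int) = ((1 : Nat) : Int) by norm_num,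
                PySem.List.pyGetD_natCast]
              rfl
            simp only [innerA, PySem.List.pyGetD_zero_cons, hget, mod_two_flip b hb]
            rw [if_neg hnb]
            omega
    · have harun : arun (b :: rest) = 0 := by
        simp only [arun]; rw [if_neg hb]
      simp only [innerA, PySem.List.pyGetD_zero_cons, add_zero]
      rw [if_neg (mod_two_ne_self b hb), harun]
      omega

-- ===== VERDICT (by name: the statement is the Claim_ definition above) =====
theorem find_preamble_spec : Claim_equal_find_preamble := by
  unfold Claim_equal_find_preamble
  intro bits _
  unfold Spec_find_preamble find_preamble find_preamble_alt
  apply PySem.List.foldl_congr_mem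
  intro st pos hpos
  obtain ⟨h0, hlt⟩ := PySem.List.mem_pyRange_one.mp hpos
  have hlt' : pos < (bits.length : Int) - 16 := lt_of_lt_of_le hlt (min_le_right _ _)
  have hp : pos = ((pos.toNat : Nat) : Int) := by omega
  have hdroplen : (((bits.drop pos.toNat).length : Nat) : Int) = (bits.length : Int) - pos := by
    simp [List.length_drop]; omega
  have hkey : ∀ (js : List Int) (run : Int), (∀ j ∈ js, 0 ≤ j) →
      innerA bits pos js run = innerA (bits.drop pos.toNat) 0 js run := by
    intro js run h
    rw [hp]
    exact innerA_suffix bits pos.toNat js run h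
  have hrunA : innerA bits pos (PySem.List.pyRange 0 (min 64 ((bits.length : Int) - pos)) 1) 0
      = min (arun (bits.drop pos.toNat)) (min 64 ((bits.length : Int) - pos)) := by
    rw [hkey _ _ (fun j hj => (PySem.List.mem_pyRange_one.mp hj).1)]
    rw [innerA_eq_min (bits.drop pos.toNat) _ (by omega) (by omega) 0]
    omega
  have hrunB : PySem.List.pyGetD (buildRunlen bits) pos 0 = arun (bits.drop pos.toNat) := by
    conv_lhs => rw [hp]
    rw [PySem.List.pyGetD_natCast, runlen_lookup]
  have ha0 := arun_nonneg (bits.drop pos.toNat)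
  have hal : arun (bits.drop pos.toNat) ≤ (bits.length : Int) - pos := by
    have := arun_le_length (bits.drop pos.toNat)
    omega
  have hmin : min (arun (bits.drop pos.toNat)) (min 64 ((bits.length : Int) - pos))
      = if arun (bits.drop pos.toNat) < 64 then arun (bits.drop pos.toNat) else 64 := by
    split_ifs <;> omega
  simp only [hrunA, hrunB, hmin]
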